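-- pv_equiv track=rewrite | github.com/avd1729/Leet-code | 648. Replace Words.py | replaceWords
-- ===== SOURCE A (Python) =====
-- from typing import List
--
-- def replaceWords(dictionary: List[str], sentence: str) -> str:
--     d = {w: len(w) for w in dictionary}
--     mini, maxi = min(d.values()), max(d.values())
--     wd = sentence.split()
--     rt = []
--     for s in wd:
--         c = s
--         for k in range(mini, min(maxi, len(s))+1):
--             ss = s[:k]
--             if ss in d:
--                 c = ss
--                 break
--         rt.append(c)
--     return " ".join(rt)
-- ===== SOURCE B (Python) =====
-- from typing import List
--
-- def replaceWords(dictionary: List[str], sentence: str) -> str: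
--     def root(s):
--         best = None
--         for r in dictionary:
--             if s.startswith(r) and (best is None or len(r) < len(best)):
--                 best = r
--         return s if best is None else best
--     return " ".join(root(w) for w in sentence.split())
-- ===== Notes on version B (the rewrite author's own statement) =====
-- stated objective: simpler
-- what changed: A builds a dict of word lengths, precomputes min/max root length and for each word probes successively longer prefix slices by hash lookup; B makes a single scan over the dictionary per word keeping the shortest root that prefixes it via startswith, with no dict, no slicing loop and no min/max precomputation.
-- outside the precondition, e.g. on replaceWords([], 'a b'): A raises ValueError, B returns 'a b'
import Mathlib
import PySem

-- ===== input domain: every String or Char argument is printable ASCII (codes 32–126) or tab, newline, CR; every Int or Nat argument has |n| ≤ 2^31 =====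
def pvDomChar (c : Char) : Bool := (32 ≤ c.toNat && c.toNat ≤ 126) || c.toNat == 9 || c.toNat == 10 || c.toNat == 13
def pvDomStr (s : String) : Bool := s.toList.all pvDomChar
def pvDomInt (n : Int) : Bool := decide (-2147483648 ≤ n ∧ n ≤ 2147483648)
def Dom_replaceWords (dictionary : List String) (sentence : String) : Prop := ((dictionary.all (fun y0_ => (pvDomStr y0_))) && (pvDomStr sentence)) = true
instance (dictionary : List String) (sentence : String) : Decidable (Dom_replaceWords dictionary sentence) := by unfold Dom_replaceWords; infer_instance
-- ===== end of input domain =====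

-- B replaces A's min/max-bounded prefix-slice probing of a length dict by a single scan of the
-- dictionary per word keeping the shortest prefixing root (objective: simpler).

-- ===== PORT A =====
-- d = {w: len(w) for w in dictionary}
def pvDictA (dictionary : List String) : PySem.Dict String Int :=
  dictionary.foldl (fun d w => d.insert w (PySem.Str.len w)) PySem.Dict.empty

def replaceWords (dictionary : List String) (sentence : String) : String :=
  let d := pvDictA dictionary
  match PySem.List.min? d.values (fun x => x), PySem.List.max? d.values (fun x => x) with
  | some mini, some maxi =>
      -- for s in sentence.split(): scan k in range(mini, min(maxi, len(s))+1), break on first hit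
      PySem.Str.join " " ((PySem.Str.split₀ sentence).foldl (fun rt s =>
        rt ++ [match (PySem.List.pyRange mini (min maxi (PySem.Str.len s) + 1)).find?
                  (fun k => d.contains (PySem.Str.slice s none (some k))) with
               | some k => PySem.Str.slice s none (some k)
               | none => s]) [])
  | _, _ => ""  -- unreachable under Pre_: Python raises ValueError (min of empty sequence) exactly here

-- ===== PORT B =====
def pvStepB (s : String) (best : Option String) (r : String) : Option String :=
  if PySem.Str.startswith s r &&
     (match best with
      | none => true
      | some b => decide (PySem.Str.len r < PySem.Str.len b))
  then some r else best

def pvRootB (dictionary : List String) (s : String) : String :=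
  match dictionary.foldl (pvStepB s) none with
  | none => s
  | some b => b

def replaceWords_alt (dictionary : List String) (sentence : String) : String :=
  PySem.Str.join " " ((PySem.Str.split₀ sentence).map (pvRootB dictionary))

-- ===== PRECONDITION & SPEC =====
-- Pre_ excludes only the empty dictionary, on which Python A raises ValueError (min of an empty sequence).
def Pre_replaceWords (dictionary : List String) (sentence : String) : Prop := dictionary ≠ []
instance (dictionary : List String) (sentence : String) : Decidable (Pre_replaceWords dictionary sentence) := by unfold Pre_replaceWords; infer_instance

def pvWitness_replaceWords : List String × String := (["a"], "a b")

def Spec_replaceWords (dictionary : List String) (sentence : String) (out : String) : Prop := out = replaceWords_alt dictionary sentence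
instance (dictionary : List String) (sentence : String) (out : String) : Decidable (Spec_replaceWords dictionary sentence out) := by unfold Spec_replaceWords; infer_instance

-- ===== CLAIM (what is proved, stated in full; the proofs are below) =====
def Claim_equal_replaceWords : Prop := ∀ (dictionary : List String) (sentence : String), Dom_replaceWords dictionary sentence → Pre_replaceWords dictionary sentence → Spec_replaceWords dictionary sentence (replaceWords dictionary sentence)

-- ===== LEMMAS AND PROOFS =====

lemma pvDictA_contains (l : List String) (d0 : PySem.Dict String Int) (x : String) :
    ((l.foldl (fun d w => d.insert w (PySem.Str.len w)) d0).contains x)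
      = (d0.contains x || decide (x ∈ l)) := by
  induction l generalizing d0 with
  | nil => simp
  | cons w t ih =>
    simp only [List.foldl_cons, ih, PySem.Dict.contains_insert, List.mem_cons]
    by_cases h1 : x = w <;> by_cases h2 : x ∈ t <;> simp [h1, h2]

lemma pvDictA_get? (l : List String) (d0 : PySem.Dict String Int) (x : String) :
    ((l.foldl (fun d w => d.insert w (PySem.Str.len w)) d0).get? x)
      = if x ∈ l then some (PySem.Str.len x) else d0.get? x := by
  induction l generalizing d0 with
  | nil => simp
  | cons w t ih =>
    simp only [List.foldl_cons, ih, PySem.Dict.get?_insert, List.mem_cons]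
    by_cases h1 : x ∈ t <;> by_cases h2 : x = w <;> simp [h1, h2]

lemma pvDictA_nodup_keys (l : List String) :
    ∀ d0 : PySem.Dict String Int, d0.keys.Nodup →
      ((l.foldl (fun d w => d.insert w (PySem.Str.len w)) d0).keys.Nodup) := by
  induction l with
  | nil => intro d0 h; simpa using h
  | cons w t ih =>
    intro d0 h
    exact ih _ (PySem.Dict.nodup_keys_insert d0 w _ h)

lemma pvGet?_mem_items : ∀ (l : List (String × Int)) (k : String) (v : Int),
    (PySem.Dict.mk l).get? k = some v → (k, v) ∈ l := by
  intro l
  induction l with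
  | nil => intro k v h; simp [PySem.Dict.get?] at h
  | cons p t ih =>
    obtain ⟨k0, v0⟩ := p
    intro k v h
    rw [PySem.Dict.get?_mk_cons] at h
    by_cases hk : (k0 == k) = true
    · rw [if_pos hk] at h
      injection h with h
      have hk' : k0 = k := by simpa using hk
      simp [hk', h]
    · rw [if_neg hk] at h
      exact List.mem_cons_of_mem _ (ih k v h)

lemma pvLen_mem_values {dictionary : List String} {w : String} (hw : w ∈ dictionary) :
    PySem.Str.len w ∈ (pvDictA dictionary).values := by
  have hget : (pvDictA dictionary).get? w = some (PySem.Str.len w) := by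
    unfold pvDictA; rw [pvDictA_get?]; simp [hw]
  have hmem : (w, PySem.Str.len w) ∈ (pvDictA dictionary).items := by
    cases hd : pvDictA dictionary with
    | mk l =>
      rw [hd] at hget
      exact pvGet?_mem_items l _ _ hget
  simp only [PySem.Dict.values, List.mem_map]
  exact ⟨(w, PySem.Str.len w), hmem, rfl⟩

lemma pvValues_src {dictionary : List String} {v : Int}
    (hv : v ∈ (pvDictA dictionary).values) : ∃ w ∈ dictionary, v = PySem.Str.len w := by
  simp only [PySem.Dict.values, List.mem_map] at hv
  obtain ⟨⟨k, v'⟩, hkv, hv'⟩ := hv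
  have hnodup : (pvDictA dictionary).keys.Nodup :=
    pvDictA_nodup_keys dictionary PySem.Dict.empty PySem.Dict.nodup_keys_empty
  have hget := PySem.Dict.get?_of_mem_items (pvDictA dictionary) hkv hnodup
  rw [show pvDictA dictionary = dictionary.foldl (fun d w => d.insert w (PySem.Str.len w)) PySem.Dict.empty from rfl,
      pvDictA_get?] at hget
  by_cases hk : k ∈ dictionary
  · rw [if_pos hk] at hget
    injection hget with h
    exact ⟨k, hk, by rw [← hv', ← h]⟩
  · simp [if_neg hk] at hget

lemma pvFind?_pyRange_some {p : Int → Bool} {a b x : Int} (h1 : a ≤ x) (h2 : x < b)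
    (hp : p x = true) (hmin : ∀ j, a ≤ j → j < x → p j = false) :
    (PySem.List.pyRange a b).find? p = some x := by
  have key : ∀ n : Nat, ∀ a : Int, a ≤ x → (x - a).toNat = n →
      (∀ j, a ≤ j → j < x → p j = false) → (PySem.List.pyRange a b).find? p = some x := by
    intro n
    induction n with
    | zero =>
      intro a ha h0 _
      have hax : a = x := by omega
      subst hax
      rw [PySem.List.pyRange_one_cons h2]
      exact List.find?_cons_of_pos hp
    | succ n ih =>
      intro a ha h0 hm
      have hax : a < x := by omega
      rw [PySem.List.pyRange_one_cons (lt_trans hax h2)]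
      rw [List.find?_cons_of_neg (by simp [hm a le_rfl hax])]
      exact ih (a + 1) (by omega) (by omega) (fun j hj1 hj2 => hm j (by omega) hj2)
  exact key (x - a).toNat a h1 rfl hmin

-- B's fold over the dictionary: the result is a shortest prefixing root
lemma pvFoldB_char (s : String) (l : List String) : ∀ (b : Option String),
    (∀ y, b = some y → y.toList <+: s.toList) →
    ((l.foldl (pvStepB s) b = none → b = none ∧ ∀ r ∈ l, ¬ r.toList <+: s.toList) ∧
     (∀ x, l.foldl (pvStepB s) b = some x →
        x.toList <+: s.toList ∧ (x ∈ l ∨ b = some x) ∧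
        (∀ r ∈ l, r.toList <+: s.toList → x.toList.length ≤ r.toList.length) ∧
        (∀ y, b = some y → x.toList.length ≤ y.toList.length))) := by
  induction l with
  | nil =>
    intro b hb
    refine ⟨fun h => ⟨by simpa using h, by simp⟩, fun x hx => ?_⟩
    simp only [List.foldl_nil] at hx
    exact ⟨hb x hx, Or.inr hx, by simp, fun y hy => by rw [hx] at hy; cases hy; exact le_rfl⟩
  | cons r t ih =>
    intro b hb
    simp only [List.foldl_cons]
    cases b with
    | none =>
      by_cases hsw : PySem.Str.startswith s r = true
      · -- picked r
        have hstep : pvStepB s none r = some r := by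
          show (if (PySem.Str.startswith s r && true) = true then some r else none) = some r
          simp only [Bool.and_true, hsw]
          exact if_pos trivial
        have hgoodr : r.toList <+: s.toList := by
          rw [PySem.Str.startswith_eq] at hsw
          exact (PySem.Chars.startswith_iff _ _).mp hsw
        rw [hstep]
        obtain ⟨ihn, ihs⟩ := ih (some r) (by intro y hy; cases hy; exact hgoodr)
        constructor
        · intro h; exact absurd (ihn h).1 (by simp)
        · intro x hx
          obtain ⟨hxg, hxm, hxt, hxb⟩ := ihs x hx
          refine ⟨hxg, ?_, ?_, by intro y hy; cases hy⟩
          · rcases hxm with h | h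
            · exact Or.inl (List.mem_cons_of_mem _ h)
            · cases h; exact Or.inl List.mem_cons_self
          · intro r' hr' hgr'
            rcases List.mem_cons.mp hr' with h | h
            · subst h; exact hxb r' rfl
            · exact hxt r' h hgr'
      · -- kept none
        have hstep : pvStepB s none r = none := by
          show (if (PySem.Str.startswith s r && true) = true then some r else none) = none
          simp only [Bool.and_true]
          rw [if_neg hsw]
        have hngr : ¬ r.toList <+: s.toList := by
          intro hgr
          exact hsw (by rw [PySem.Str.startswith_eq]; exact (PySem.Chars.startswith_iff _ _).mpr hgr)
        rw [hstep]
        obtain ⟨ihn, ihs⟩ := ih none (by intro y hy; cases hy)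
        constructor
        · intro h
          refine ⟨rfl, fun r' hr' => ?_⟩
          rcases List.mem_cons.mp hr' with h' | h'
          · subst h'; exact hngr
          · exact (ihn h).2 r' h'
        · intro x hx
          obtain ⟨hxg, hxm, hxt, hxb⟩ := ihs x hx
          refine ⟨hxg, ?_, ?_, by intro y hy; cases hy⟩
          · rcases hxm with h | h
            · exact Or.inl (List.mem_cons_of_mem _ h)
            · cases h
          · intro r' hr' hgr'
            rcases List.mem_cons.mp hr' with h | h
            · subst h; exact absurd hgr' hngr
            · exact hxt r' h hgr'
    | some b0 =>
      have hgb0 : b0.toList <+: s.toList := hb b0 rfl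
      by_cases hcond : (PySem.Str.startswith s r && decide (PySem.Str.len r < PySem.Str.len b0)) = true
      · -- picked r over b0
        have hstep : pvStepB s (some b0) r = some r := by
          show (if (PySem.Str.startswith s r && decide (PySem.Str.len r < PySem.Str.len b0)) = true then some r else some b0) = some r
          rw [if_pos hcond]
        obtain ⟨hsw, hlt⟩ := (Bool.and_eq_true _ _).mp hcond
        have hgoodr : r.toList <+: s.toList := by
          rw [PySem.Str.startswith_eq] at hsw
          exact (PySem.Chars.startswith_iff _ _).mp hsw
        have hltn : r.toList.length < b0.toList.length := by
          have := of_decide_eq_true hlt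
          rw [PySem.Str.len_eq, PySem.Str.len_eq] at this
          exact_mod_cast this
        rw [hstep]
        obtain ⟨ihn, ihs⟩ := ih (some r) (by intro y hy; cases hy; exact hgoodr)
        constructor
        · intro h; exact absurd (ihn h).1 (by simp)
        · intro x hx
          obtain ⟨hxg, hxm, hxt, hxb⟩ := ihs x hx
          have hxr : x.toList.length ≤ r.toList.length := hxb r rfl
          refine ⟨hxg, ?_, ?_, ?_⟩
          · rcases hxm with h | h
            · exact Or.inl (List.mem_cons_of_mem _ h)
            · cases h; exact Or.inl List.mem_cons_self
          · intro r' hr' hgr'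
            rcases List.mem_cons.mp hr' with h | h
            · subst h; exact hxr
            · exact hxt r' h hgr'
          · intro y hy
            cases hy
            omega
      · -- kept b0
        have hstep : pvStepB s (some b0) r = some b0 := by
          show (if (PySem.Str.startswith s r && decide (PySem.Str.len r < PySem.Str.len b0)) = true then some r else some b0) = some b0
          rw [if_neg hcond]
        rw [hstep]
        obtain ⟨ihn, ihs⟩ := ih (some b0) (by intro y hy; cases hy; exact hgb0)
        constructor
        · intro h; exact absurd (ihn h).1 (by simp)
        · intro x hx
          obtain ⟨hxg, hxm, hxt, hxb⟩ := ihs x hx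
          have hxb0 : x.toList.length ≤ b0.toList.length := hxb b0 rfl
          refine ⟨hxg, ?_, ?_, ?_⟩
          · rcases hxm with h | h
            · exact Or.inl (List.mem_cons_of_mem _ h)
            · exact Or.inr h
          · intro r' hr' hgr'
            rcases List.mem_cons.mp hr' with h | h
            · subst h
              have hsw : PySem.Str.startswith s r' = true := by
                rw [PySem.Str.startswith_eq]
                exact (PySem.Chars.startswith_iff _ _).mpr hgr'
              have hnlt : ¬ (PySem.Str.len r' < PySem.Str.len b0) := by
                intro hlt
                exact hcond (by rw [hsw, Bool.true_and]; exact decide_eq_true hlt)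
              rw [PySem.Str.len_eq, PySem.Str.len_eq] at hnlt
              have : b0.toList.length ≤ r'.toList.length := by omega
              omega
            · exact hxt r' h hgr'
          · intro y hy
            cases hy
            exact hxb0

-- the per-word equality
lemma pvPerWord (dictionary : List String) (mini maxi : Int)
    (hmin : PySem.List.min? (pvDictA dictionary).values (fun x => x) = some mini)
    (hmax : PySem.List.max? (pvDictA dictionary).values (fun x => x) = some maxi)
    (s : String) :
    (match (PySem.List.pyRange mini (min maxi (PySem.Str.len s) + 1)).find?
        (fun k => (pvDictA dictionary).contains (PySem.Str.slice s none (some k))) with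
     | some k => PySem.Str.slice s none (some k)
     | none => s) = pvRootB dictionary s := by
  have hminle : ∀ w ∈ dictionary, mini ≤ PySem.Str.len w := by
    intro w hw
    exact PySem.List.min?_isMin hmin _ (pvLen_mem_values hw)
  have hmaxge : ∀ w ∈ dictionary, PySem.Str.len w ≤ maxi := by
    intro w hw
    exact PySem.List.max?_isMax hmax _ (pvLen_mem_values hw)
  have hmini0 : 0 ≤ mini := by
    obtain ⟨w, _, hweq⟩ := pvValues_src (PySem.List.min?_mem hmin)
    rw [hweq, PySem.Str.len_eq]
    exact Int.natCast_nonneg _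
  have hcontains : ∀ x : String,
      (pvDictA dictionary).contains x = decide (x ∈ dictionary) := by
    intro x
    unfold pvDictA
    rw [pvDictA_contains]
    simp
  have hsliceList : ∀ k : Int, 0 ≤ k →
      (PySem.Str.slice s none (some k)).toList = s.toList.take k.toNat := by
    intro k hk
    rw [PySem.Str.toList_slice, PySem.Chars.slice_eq_listSlice, PySem.List.slice_to s.toList hk]
  have hpred : ∀ k : Int, 0 ≤ k → k ≤ PySem.Str.len s →
      (((pvDictA dictionary).contains (PySem.Str.slice s none (some k)) = true) ↔
        ∃ r ∈ dictionary, r.toList <+: s.toList ∧ (r.toList.length : Int) = k) := by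
    intro k hk0 hkn
    rw [hcontains, decide_eq_true_iff]
    rw [PySem.Str.len_eq] at hkn
    constructor
    · intro hmem
      refine ⟨PySem.Str.slice s none (some k), hmem, ?_, ?_⟩
      · rw [hsliceList k hk0]; exact List.take_prefix _ _
      · rw [hsliceList k hk0, List.length_take]
        have : k.toNat ≤ s.toList.length := by omega
        simp only [min_eq_left this]
        omega
    · rintro ⟨r, hr, hpre, hlen⟩
      have hr' : r.toList = s.toList.take k.toNat := by
        rw [List.prefix_iff_eq_take.mp hpre]
        congr 1
        omega
      have : PySem.Str.slice s none (some k) = r :=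
        String.toList_inj.mp (by rw [hsliceList k hk0, hr'])
      rwa [this]
  obtain ⟨hnone, hsome⟩ := pvFoldB_char s dictionary none (by intro y h; cases h)
  cases hres : dictionary.foldl (pvStepB s) none with
  | none =>
    have hng := (hnone hres).2
    have hfind : (PySem.List.pyRange mini (min maxi (PySem.Str.len s) + 1)).find?
        (fun k => (pvDictA dictionary).contains (PySem.Str.slice s none (some k))) = none := by
      rw [List.find?_eq_none]
      intro k hkmem
      obtain ⟨hk1, hk2⟩ := PySem.List.mem_pyRange_one.mp hkmem
      have hk0 : 0 ≤ k := le_trans hmini0 hk1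
      have hkn : k ≤ PySem.Str.len s := by
        have : k ≤ min maxi (PySem.Str.len s) := by omega
        exact le_trans this (min_le_right _ _)
      intro hcontr
      obtain ⟨r, hr, hgr, _⟩ := (hpred k hk0 hkn).mp (by simpa using hcontr)
      exact hng r hr hgr
    rw [hfind]
    simp [pvRootB, hres]
  | some x =>
    obtain ⟨hxg, hxm, hxt, _⟩ := hsome x hres
    have hxmem : x ∈ dictionary := by
      rcases hxm with h | h
      · exact h
      · cases h
    have hxlen : (x.toList.length : Int) = PySem.Str.len x := (PySem.Str.len_eq x).symm
    have hkx0 : (0:Int) ≤ (x.toList.length : Int) := Int.natCast_nonneg _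
    have hkxn : (x.toList.length : Int) ≤ PySem.Str.len s := by
      rw [PySem.Str.len_eq]
      exact_mod_cast hxg.length_le
    have hfind : (PySem.List.pyRange mini (min maxi (PySem.Str.len s) + 1)).find?
        (fun k => (pvDictA dictionary).contains (PySem.Str.slice s none (some k)))
          = some (x.toList.length : Int) := by
      apply pvFind?_pyRange_some
      · rw [hxlen]; exact hminle x hxmem
      · have h1 : (x.toList.length : Int) ≤ maxi := by rw [hxlen]; exact hmaxge x hxmem
        have : (x.toList.length : Int) ≤ min maxi (PySem.Str.len s) := le_min h1 hkxn
        omega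
      · exact (hpred _ hkx0 hkxn).mpr ⟨x, hxmem, hxg, rfl⟩
      · intro j hj1 hj2
        have hj0 : 0 ≤ j := le_trans hmini0 hj1
        have hjn : j ≤ PySem.Str.len s := le_trans (le_of_lt hj2) hkxn
        by_contra hcontr
        simp only [Bool.not_eq_false] at hcontr
        obtain ⟨r, hr, hgr, hlenr⟩ := (hpred j hj0 hjn).mp (by simpa using hcontr)
        have := hxt r hr hgr
        omega
    have hslx : PySem.Str.slice s none (some (x.toList.length : Int)) = x := by
      apply String.toList_inj.mp
      rw [hsliceList _ hkx0]
      simp only [Int.toNat_natCast]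
      exact (List.prefix_iff_eq_take.mp hxg).symm
    rw [hfind]
    simpa [pvRootB, hres] using hslx

-- ===== VERDICT (by name: the statement is the Claim_ definition above) =====
theorem replaceWords_spec : Claim_equal_replaceWords := by
  intro dictionary sentence _ hpre
  unfold Spec_replaceWords replaceWords replaceWords_alt
  obtain ⟨w, hw⟩ := List.exists_mem_of_ne_nil dictionary hpre
  have hvne : PySem.Str.len w ∈ (pvDictA dictionary).values := pvLen_mem_values hw
  cases hmin : PySem.List.min? (pvDictA dictionary).values (fun x => x) with
  | none =>
    rw [PySem.List.min?_eq_none_iff] at hmin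
    rw [hmin] at hvne
    cases hvne
  | some mini =>
    cases hmax : PySem.List.max? (pvDictA dictionary).values (fun x => x) with
    | none =>
      rw [PySem.List.max?_eq_none_iff] at hmax
      rw [hmax] at hvne
      cases hvne
    | some maxi =>
      simp only [hmin, hmax]
      simp only [PySem.List.foldl_append_singleton_eq_map]
      simp only [List.nil_append]
      congr 1
      exact List.map_congr_left (fun s _ => pvPerWord dictionary mini maxi hmin hmax s)
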